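-- pv_equiv track=rewrite | github.com/koenvanwijk/so101-arm-calibration | scripts/calibrate_via_controller.py | circular_span
-- ===== SOURCE A (Python) =====
-- from typing import Dict, List, Optional
--
-- TICKS = 4096
--
-- def circular_span(samples: List[int], mod: int = TICKS) -> int:
--     if not samples or len(samples) == 1:
--         return 0
--     pts = sorted([s % mod for s in samples])
--     gaps = [pts[i + 1] - pts[i] for i in range(len(pts) - 1)]
--     gaps.append((pts[0] + mod) - pts[-1])
--     largest_gap = max(gaps)
--     return mod - largest_gap
-- ===== SOURCE B (Python) =====
-- TICKS = 4096
--
-- def _largest_gap(xs, lo, hi):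
--     # Largest gap between consecutive values of xs (whose min is lo and max is hi),
--     # found by bisecting the value range -- no sorting anywhere.
--     if hi <= lo:
--         return 0
--     mid = (lo + hi) // 2
--     left = [x for x in xs if x <= mid]
--     right = [x for x in xs if x > mid]
--     ml = max(left, default=lo)
--     mr = min(right, default=hi)
--     return max(mr - ml, _largest_gap(left, lo, ml), _largest_gap(right, mr, hi))
--
-- def circular_span(samples, mod=TICKS):
--     if len(samples) < 2:
--         return 0
--     res = [s % mod for s in samples]
--     lo = min(res)
--     hi = max(res)
--     return mod - max(_largest_gap(res, lo, hi), lo + mod - hi)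
-- ===== Notes on version B (the rewrite author's own statement) =====
-- stated objective: alternative
-- what changed: B never sorts: it finds the largest gap by recursively bisecting the value range (partition the residues at the midpoint; the gap across the cut is min(right) - max(left); recurse into each half), while A sorts the residues and scans adjacent pairs.
import Mathlib
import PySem

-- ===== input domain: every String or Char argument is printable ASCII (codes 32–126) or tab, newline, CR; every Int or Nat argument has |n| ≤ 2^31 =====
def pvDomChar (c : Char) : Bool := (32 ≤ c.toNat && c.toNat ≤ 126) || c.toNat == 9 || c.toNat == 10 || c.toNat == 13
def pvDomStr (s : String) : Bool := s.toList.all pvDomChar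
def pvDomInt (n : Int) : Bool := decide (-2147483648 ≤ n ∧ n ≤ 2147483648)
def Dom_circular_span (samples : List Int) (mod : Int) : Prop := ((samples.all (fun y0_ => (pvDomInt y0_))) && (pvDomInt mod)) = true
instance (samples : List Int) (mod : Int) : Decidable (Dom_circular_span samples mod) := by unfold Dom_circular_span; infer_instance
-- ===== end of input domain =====

-- B finds the largest gap by recursively bisecting the VALUE range (partition at the
-- midpoint, gap across the cut = min(right) - max(left)) instead of sorting and
-- scanning adjacent pairs; objective: alternative (no sort anywhere).

-- ===== PORT A =====
def circular_span (samples : List Int) (mod : Int) : Int :=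
  if samples = [] ∨ samples.length = 1 then 0
  else
    let pts := PySem.List.sorted (samples.map (fun s => PySem.Int.mod s mod)) (fun x => x) false
    -- [pts[i+1] - pts[i] for i in range(len(pts)-1)]: both indices are in range, so getD is exact
    let gaps := (List.range (pts.length - 1)).map (fun i => pts.getD (i + 1) 0 - pts.getD i 0)
    -- gaps.append((pts[0] + mod) - pts[-1]); pts is nonempty here, so the defaults are unreachable
    let gaps2 := gaps ++ [(pts.getD 0 0 + mod) - (PySem.List.pyGet? pts (-1)).getD 0]
    -- max(gaps) on a list that is nonempty by construction
    mod - ((PySem.List.max? gaps2 (fun x => x)).getD 0)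

-- ===== PORT B =====
-- termination facts for largestGap (cited in decreasing_by)
theorem lg_mid_bounds (lo hi : Int) (h : ¬ hi ≤ lo) :
    lo ≤ PySem.Int.floordiv (lo + hi) 2 ∧ PySem.Int.floordiv (lo + hi) 2 < hi := by
  rw [PySem.Int.floordiv_eq_ediv_of_pos (by norm_num)]
  omega

-- the two comprehensions [x for x in xs if x <= mid] and [x for x in xs if x > mid]
def lgLe (xs : List Int) (mid : Int) : List Int := xs.filter (fun x => decide (x ≤ mid))
def lgGt (xs : List Int) (mid : Int) : List Int := xs.filter (fun x => decide (mid < x))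

theorem lg_max_filter_le (xs : List Int) (mid lo : Int) (h : lo ≤ mid) :
    (PySem.List.max? (lgLe xs mid) (fun x => x)).getD lo ≤ mid := by
  cases hm : PySem.List.max? (lgLe xs mid) (fun x => x) with
  | none => simpa using h
  | some m =>
    have hmem := PySem.List.max?_mem hm
    rw [lgLe] at hmem
    have := (List.mem_filter.mp hmem).2
    simpa using this

theorem lg_min_filter_gt (xs : List Int) (mid hi : Int) (h : mid < hi) :
    mid < (PySem.List.min? (lgGt xs mid) (fun x => x)).getD hi := by
  cases hm : PySem.List.min? (lgGt xs mid) (fun x => x) with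
  | none => simpa using h
  | some m =>
    have hmem := PySem.List.min?_mem hm
    rw [lgGt] at hmem
    have := (List.mem_filter.mp hmem).2
    simpa using this

def largestGap (xs : List Int) (lo hi : Int) : Int :=
  if hi ≤ lo then 0
  else
    let mid := PySem.Int.floordiv (lo + hi) 2
    let left := lgLe xs mid
    let right := lgGt xs mid
    -- max(left, default=lo), min(right, default=hi)
    let ml := (PySem.List.max? left (fun x => x)).getD lo
    let mr := (PySem.List.min? right (fun x => x)).getD hi
    max (mr - ml) (max (largestGap left lo ml) (largestGap right mr hi))
termination_by (hi - lo).toNat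
decreasing_by
  · have h1 := lg_mid_bounds lo hi (by assumption)
    have h2 := lg_max_filter_le xs (PySem.Int.floordiv (lo + hi) 2) lo h1.1
    omega
  · have h1 := lg_mid_bounds lo hi (by assumption)
    have h2 := lg_min_filter_gt xs (PySem.Int.floordiv (lo + hi) 2) hi h1.2
    omega

def circular_span_alt (samples : List Int) (mod : Int) : Int :=
  if samples.length < 2 then 0
  else
    let res := samples.map (fun s => PySem.Int.mod s mod)
    -- min(res), max(res): res is nonempty here, so the defaults are unreachable
    let lo := (PySem.List.min? res (fun x => x)).getD 0
    let hi := (PySem.List.max? res (fun x => x)).getD 0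
    mod - max (largestGap res lo hi) (lo + mod - hi)

-- ===== PRECONDITION & SPEC =====
-- Pre_ excludes mod = 0 with two or more samples: Python's % raises ZeroDivisionError
-- there (in both A and B); with fewer than two samples both return 0 before any %.
def Pre_circular_span (samples : List Int) (mod : Int) : Prop := samples.length ≤ 1 ∨ mod ≠ 0
instance (samples : List Int) (mod : Int) : Decidable (Pre_circular_span samples mod) := by
  unfold Pre_circular_span; infer_instance

def pvWitness_circular_span : List Int × Int := ([0, 5, 9], 12)

def Spec_circular_span (samples : List Int) (mod : Int) (out : Int) : Prop :=
  out = circular_span_alt samples mod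
instance (samples : List Int) (mod : Int) (out : Int) : Decidable (Spec_circular_span samples mod out) := by
  unfold Spec_circular_span; infer_instance

-- ===== CLAIM (what is proved, stated in full; the proofs are below) =====
def Claim_equal_circular_span : Prop := ∀ (samples : List Int) (mod : Int), Dom_circular_span samples mod → Pre_circular_span samples mod → Spec_circular_span samples mod (circular_span samples mod)

-- ===== LEMMAS AND PROOFS =====

-- adjacent differences of a list (the gaps of the sorted list)
def adjd : List Int → List Int
  | a :: b :: t => (b - a) :: adjd (b :: t)
  | _ => []

theorem adjd_eq_range_map (t : List Int) : ∀ a : Int,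
    (List.range ((a :: t).length - 1)).map
      (fun i => (a :: t).getD (i + 1) 0 - (a :: t).getD i 0) = adjd (a :: t) := by
  induction t with
  | nil => intro a; simp [adjd]
  | cons b t ih =>
    intro a
    simp only [List.length_cons, Nat.add_sub_cancel, List.range_succ_eq_map, List.map_cons,
      List.map_map]
    refine congrArg₂ _ (by simp) ?_
    have h2 := ih b
    simp only [List.length_cons, Nat.add_sub_cancel] at h2
    show _ = adjd (b :: t)
    rw [← h2]
    apply List.map_congr_left
    intro i _
    simp [Nat.succ_eq_add_one]

theorem foldl_max_init (l : List Int) : ∀ a b : Int,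
    l.foldl max (a ⊔ b) = a ⊔ l.foldl max b := by
  induction l with
  | nil => intro a b; rfl
  | cons x l ih =>
    intro a b
    show l.foldl max ((a ⊔ b) ⊔ x) = a ⊔ l.foldl max (b ⊔ x)
    rw [max_assoc, ih]

theorem pyGet_neg_one (t : List Int) (a : Int) :
    PySem.List.pyGet? (a :: t) (-1) = (a :: t).getLast? := by
  simp [PySem.List.pyGet?, PySem.List.pyIdx?, List.getLast?_eq_getElem?]

theorem circA_eq (s0 s1 : Int) (rest2 : List Int) (mod a b : Int) (T' : List Int)
    (hL : PySem.List.sorted ((s0 :: s1 :: rest2).map (fun s => PySem.Int.mod s mod)) (fun x => x) false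
            = a :: b :: T') :
    circular_span (s0 :: s1 :: rest2) mod
      = mod - ((adjd (b :: T')).foldl max (b - a) ⊔ (a + mod - ((a :: b :: T').getLast?).getD 0)) := by
  rw [circular_span]
  rw [if_neg (by simp)]
  simp only [hL, adjd_eq_range_map, pyGet_neg_one, List.getD_cons_zero]
  rw [show adjd (a :: b :: T') = (b - a) :: adjd (b :: T') from rfl, List.cons_append]
  rw [PySem.List.max?_id_cons, Option.getD_some, List.foldl_append]
  rfl

-- fold-min / fold-max of a nonempty list: a member that bounds every member
theorem foldl_min_spec (t : List Int) : ∀ x : Int,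
    t.foldl min x ∈ x :: t ∧ ∀ y ∈ x :: t, t.foldl min x ≤ y := by
  induction t with
  | nil => intro x; exact ⟨by simp, by simp⟩
  | cons b t ih =>
    intro x
    have h := ih (min x b)
    have he : (b :: t).foldl min x = t.foldl min (min x b) := rfl
    rw [he]
    constructor
    · rcases List.mem_cons.mp h.1 with hm | hm
      · rw [hm]
        rcases le_total x b with hb | hb
        · rw [min_eq_left hb]; simp
        · rw [min_eq_right hb]; simp
      · exact List.mem_cons_of_mem _ (List.mem_cons_of_mem _ hm)
    · intro y hy
      rcases List.mem_cons.mp hy with rfl | hy'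
      · exact le_trans (h.2 (min y b) List.mem_cons_self) (min_le_left _ _)
      · rcases List.mem_cons.mp hy' with rfl | hy''
        · exact le_trans (h.2 (min x y) List.mem_cons_self) (min_le_right _ _)
        · exact h.2 _ (List.mem_cons_of_mem _ hy'')

theorem foldl_max_spec (t : List Int) : ∀ x : Int,
    t.foldl max x ∈ x :: t ∧ ∀ y ∈ x :: t, y ≤ t.foldl max x := by
  induction t with
  | nil => intro x; exact ⟨by simp, by simp⟩
  | cons b t ih =>
    intro x
    have h := ih (max x b)
    have he : (b :: t).foldl max x = t.foldl max (max x b) := rfl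
    rw [he]
    constructor
    · rcases List.mem_cons.mp h.1 with hm | hm
      · rw [hm]
        rcases le_total x b with hb | hb
        · rw [max_eq_right hb]; simp
        · rw [max_eq_left hb]; simp
      · exact List.mem_cons_of_mem _ (List.mem_cons_of_mem _ hm)
    · intro y hy
      rcases List.mem_cons.mp hy with rfl | hy'
      · exact le_trans (le_max_left y b) (h.2 (max y b) List.mem_cons_self)
      · rcases List.mem_cons.mp hy' with rfl | hy''
        · exact le_trans (le_max_right x y) (h.2 (max x y) List.mem_cons_self)
        · exact h.2 _ (List.mem_cons_of_mem _ hy'')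

-- min?/max? .getD of a nonempty list: member + extremal
theorem min_getD_spec (c : Int) (t : List Int) (d : Int) :
    (PySem.List.min? (c :: t) (fun x => x)).getD d ∈ c :: t ∧
      ∀ y ∈ c :: t, (PySem.List.min? (c :: t) (fun x => x)).getD d ≤ y := by
  rw [PySem.List.min?_id_cons, Option.getD_some]
  exact foldl_min_spec t c

theorem max_getD_spec (c : Int) (t : List Int) (d : Int) :
    (PySem.List.max? (c :: t) (fun x => x)).getD d ∈ c :: t ∧
      ∀ y ∈ c :: t, y ≤ (PySem.List.max? (c :: t) (fun x => x)).getD d := by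
  rw [PySem.List.max?_id_cons, Option.getD_some]
  exact foldl_max_spec t c

-- last element of a (≤)-pairwise list bounds every member
theorem pairwise_le_getLast (t : List Int) : ∀ a : Int, (a :: t).Pairwise (· ≤ ·) →
    (∀ x ∈ a :: t, x ≤ ((a :: t).getLast?).getD 0) ∧ ((a :: t).getLast?).getD 0 ∈ a :: t := by
  induction t with
  | nil => intro a _; simp
  | cons b t ih =>
    intro a hp
    have h := ih b (List.pairwise_cons.mp hp).2
    rw [List.getLast?_cons_cons]
    constructor
    · intro x hx
      rcases List.mem_cons.mp hx with rfl | hx'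
      · exact le_trans ((List.pairwise_cons.mp hp).1 b (by simp)) (h.1 b (by simp))
      · exact h.1 x hx'
    · exact List.mem_cons_of_mem _ h.2

-- all-equal list: every adjacent difference is 0, so the gap fold is 0
theorem adjd_foldl_all_eq (l : List Int) (c : Int) (h : ∀ x ∈ l, x = c) :
    ∀ w : Int, 0 ≤ w → (adjd l).foldl max w = w := by
  induction l with
  | nil => intro w _; rfl
  | cons a t ih =>
    intro w hw
    cases t with
    | nil => rfl
    | cons b t' =>
      have hb : b = c := h b (by simp)
      have ha : a = c := h a (by simp)
      rw [show adjd (a :: b :: t') = (b - a) :: adjd (b :: t') from rfl, List.foldl_cons]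
      have hba : max w (b - a) = w := by
        rw [ha, hb, sub_self]; exact max_eq_left hw
      rw [hba]
      exact ih (fun x hx => h x (List.mem_cons_of_mem _ hx)) w hw

-- sorted splits at any pivot: sorted xs = sorted (≤ mid part) ++ sorted (> mid part)
theorem sorted_split (xs : List Int) (mid : Int) :
    PySem.List.sorted xs (fun x => x) false
      = PySem.List.sorted (xs.filter (fun x => decide (x ≤ mid))) (fun x => x) false
        ++ PySem.List.sorted (xs.filter (fun x => decide (mid < x))) (fun x => x) false := by
  have hperm : (PySem.List.sorted (xs.filter (fun x => decide (x ≤ mid))) (fun x => x) false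
        ++ PySem.List.sorted (xs.filter (fun x => decide (mid < x))) (fun x => x) false).Perm xs := by
    have h1 : (PySem.List.sorted (xs.filter (fun x => decide (x ≤ mid))) (fun x => x) false
        ++ PySem.List.sorted (xs.filter (fun x => decide (mid < x))) (fun x => x) false).Perm
        (xs.filter (fun x => decide (x ≤ mid)) ++ xs.filter (fun x => decide (mid < x))) :=
      List.Perm.append (PySem.List.sorted_perm _ _ _) (PySem.List.sorted_perm _ _ _)
    have h := List.filter_append_perm (fun x => decide (x ≤ mid)) xs
    have he : xs.filter (fun x => !decide (x ≤ mid)) = xs.filter (fun x => decide (mid < x)) := by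
      apply List.filter_congr
      intro x _
      rw [show (decide (mid < x)) = decide (¬ (x ≤ mid)) from by rw [decide_eq_decide]; omega,
        decide_not]
    rw [he] at h
    exact h1.trans h
  have hpw : (PySem.List.sorted (xs.filter (fun x => decide (x ≤ mid))) (fun x => x) false
        ++ PySem.List.sorted (xs.filter (fun x => decide (mid < x))) (fun x => x) false).Pairwise (· ≤ ·) := by
    rw [List.pairwise_append]
    refine ⟨PySem.List.sorted_pairwise _ _, PySem.List.sorted_pairwise _ _, ?_⟩
    intro a ha b hb
    have ha' := (List.mem_filter.mp ((PySem.List.mem_sorted _ _ _ _).mp ha)).2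
    have hb' := (List.mem_filter.mp ((PySem.List.mem_sorted _ _ _ _).mp hb)).2
    simp only [decide_eq_true_eq] at ha' hb'
    omega
  exact PySem.List.sorted_id_eq_of_perm_of_pairwise _ _ hperm hpw

-- adjacent differences of a concatenation of two nonempty lists
theorem adjd_append (A' : List Int) : ∀ (a b : Int) (B' : List Int),
    adjd ((a :: A') ++ b :: B')
      = adjd (a :: A') ++ (b - ((a :: A').getLast?).getD 0) :: adjd (b :: B') := by
  induction A' with
  | nil => intro a b B'; simp [adjd]
  | cons c A'' ih =>
    intro a b B'
    have h1 : (a :: c :: A'') ++ b :: B' = a :: ((c :: A'') ++ b :: B') := rfl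
    have h2 : adjd (a :: ((c :: A'') ++ b :: B')) = (c - a) :: adjd ((c :: A'') ++ b :: B') := rfl
    rw [h1, h2, ih c b B']
    simp [adjd, List.getLast?_cons_cons]

theorem zero_le_foldl_max_zero (l : List Int) : (0 : Int) ≤ l.foldl max 0 :=
  (PySem.List.le_foldl_max l 0).1

-- the heart: range-bisection computes the largest adjacent gap of the sorted list
theorem largestGap_eq (n : Nat) : ∀ (xs : List Int) (lo hi : Int), (hi - lo).toNat = n →
    lo ∈ xs → hi ∈ xs → (∀ x ∈ xs, lo ≤ x ∧ x ≤ hi) →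
    largestGap xs lo hi = (adjd (PySem.List.sorted xs (fun x => x) false)).foldl max 0 := by
  induction n using Nat.strong_induction_on with
  | _ n IH =>
    intro xs lo hi hn hlo hhi hbound
    by_cases hle : hi ≤ lo
    · -- all elements equal lo
      have hall : ∀ x ∈ xs, x = lo := by
        intro x hx
        have := hbound x hx
        omega
      rw [largestGap, if_pos hle]
      have hall' : ∀ x ∈ PySem.List.sorted xs (fun x => x) false, x = lo := by
        intro x hx
        exact hall x ((PySem.List.mem_sorted _ _ _ _).mp hx)
      rw [adjd_foldl_all_eq _ lo hall' 0 le_rfl]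
    · rw [largestGap, if_neg hle]
      have hlt : lo < hi := by omega
      have hmid := lg_mid_bounds lo hi hle
      set mid := PySem.Int.floordiv (lo + hi) 2 with hmiddef
      simp only [lgLe, lgGt]
      set left := xs.filter (fun x => decide (x ≤ mid)) with hleftdef
      set right := xs.filter (fun x => decide (mid < x)) with hrightdef
      have hloL : lo ∈ left := List.mem_filter.mpr ⟨hlo, by simp; omega⟩
      have hhiR : hi ∈ right := List.mem_filter.mpr ⟨hhi, by simp; omega⟩
      obtain ⟨c, t, hLshape⟩ : ∃ c t, left = c :: t := by
        cases hL : left with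
        | nil => rw [hL] at hloL; simp at hloL
        | cons c t => exact ⟨c, t, rfl⟩
      obtain ⟨c', t', hRshape⟩ : ∃ c' t', right = c' :: t' := by
        cases hR : right with
        | nil => rw [hR] at hhiR; simp at hhiR
        | cons c' t' => exact ⟨c', t', rfl⟩
      set ml := (PySem.List.max? left (fun x => x)).getD lo with hmldef
      set mr := (PySem.List.min? right (fun x => x)).getD hi with hmrdef
      have hmlspec : ml ∈ left ∧ ∀ y ∈ left, y ≤ ml := by
        rw [hmldef, hLshape]; exact max_getD_spec c t lo
      have hmrspec : mr ∈ right ∧ ∀ y ∈ right, mr ≤ y := by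
        rw [hmrdef, hRshape]; exact min_getD_spec c' t' hi
      -- bucket bounds
      have hml_le_mid : ml ≤ mid := by
        have := (List.mem_filter.mp hmlspec.1).2; simpa using this
      have hmr_gt_mid : mid < mr := by
        have := (List.mem_filter.mp hmrspec.1).2; simpa using this
      have hlo_le_ml : lo ≤ ml := (hbound ml (List.mem_of_mem_filter hmlspec.1)).1
      have hmr_le_hi : mr ≤ hi := (hbound mr (List.mem_of_mem_filter hmrspec.1)).2
      -- recursive calls via IH
      have hIHL : largestGap left lo ml
          = (adjd (PySem.List.sorted left (fun x => x) false)).foldl max 0 := by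
        apply IH (ml - lo).toNat (by omega) left lo ml rfl hloL hmlspec.1
        intro x hx
        exact ⟨(hbound x (List.mem_of_mem_filter hx)).1, hmlspec.2 x hx⟩
      have hIHR : largestGap right mr hi
          = (adjd (PySem.List.sorted right (fun x => x) false)).foldl max 0 := by
        apply IH (hi - mr).toNat (by omega) right mr hi rfl hmrspec.1 hhiR
        intro x hx
        exact ⟨hmrspec.2 x hx, (hbound x (List.mem_of_mem_filter hx)).2⟩
      -- shapes of the two sorted halves
      have hSLne : PySem.List.sorted left (fun x => x) false ≠ [] := by
        rw [Ne, PySem.List.sorted_eq_nil_iff]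
        rw [hLshape]; simp
      have hSRne : PySem.List.sorted right (fun x => x) false ≠ [] := by
        rw [Ne, PySem.List.sorted_eq_nil_iff]
        rw [hRshape]; simp
      obtain ⟨p, P, hSL⟩ := List.exists_cons_of_ne_nil hSLne
      obtain ⟨q, Q, hSR⟩ := List.exists_cons_of_ne_nil hSRne
      -- last of sorted left = ml, head of sorted right = mr
      have hlastL : ((p :: P).getLast?).getD 0 = ml := by
        have hpw : (p :: P).Pairwise (· ≤ ·) := by
          rw [← hSL]; exact PySem.List.sorted_pairwise _ _
        have h := pairwise_le_getLast P p hpw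
        apply le_antisymm
        · have hmem2 : ((p :: P).getLast?).getD 0 ∈ left := by
            apply (PySem.List.mem_sorted left (fun x => x) false _).mp
            rw [hSL]
            exact h.2
          exact hmlspec.2 _ hmem2
        · have hmem : ml ∈ p :: P := by
            rw [← hSL]
            exact (PySem.List.mem_sorted left (fun x => x) false ml).mpr hmlspec.1
          exact h.1 ml hmem
      have hheadR : q = mr := by
        have hq : q ∈ right := by
          apply (PySem.List.mem_sorted right (fun x => x) false q).mp
          rw [hSR]
          exact List.mem_cons_self
        exact le_antisymm (PySem.List.key_head_sorted_le right (fun x => x) hSR mr hmrspec.1)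
          (hmrspec.2 q hq)
      -- assemble
      rw [hIHL, hIHR, sorted_split xs mid, ← hleftdef, ← hrightdef, hSL, hSR,
        adjd_append P p q Q, hlastL]
      rw [List.foldl_append, List.foldl_cons]
      set FA := (adjd (p :: P)).foldl max 0 with hFA
      set FB := (adjd (q :: Q)).foldl max 0 with hFB
      have hFA0 : (0:Int) ≤ FA := zero_le_foldl_max_zero _
      have : (adjd (q :: Q)).foldl max (max FA (q - ml)) = (FA ⊔ (q - ml)) ⊔ FB := by
        have h0 : max FA (q - ml) = (FA ⊔ (q - ml)) ⊔ 0 := by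
          rw [max_assoc]
          congr 1
          omega
        rw [h0, foldl_max_init, ← hFB, ← h0]
      rw [this, hheadR]
      rw [max_comm FA (mr - ml), ← max_assoc]

theorem circB_unfold (s0 s1 : Int) (rest2 : List Int) (mod : Int) :
    circular_span_alt (s0 :: s1 :: rest2) mod
      = mod - max (largestGap ((s0 :: s1 :: rest2).map (fun s => PySem.Int.mod s mod))
            ((PySem.List.min? ((s0 :: s1 :: rest2).map (fun s => PySem.Int.mod s mod)) (fun x => x)).getD 0)
            ((PySem.List.max? ((s0 :: s1 :: rest2).map (fun s => PySem.Int.mod s mod)) (fun x => x)).getD 0))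
          (((PySem.List.min? ((s0 :: s1 :: rest2).map (fun s => PySem.Int.mod s mod)) (fun x => x)).getD 0) + mod
            - ((PySem.List.max? ((s0 :: s1 :: rest2).map (fun s => PySem.Int.mod s mod)) (fun x => x)).getD 0)) := by
  rw [circular_span_alt, if_neg (by simp)]

-- ===== VERDICT (by name: the statement is the Claim_ definition above) =====
theorem circular_span_spec : Claim_equal_circular_span := by
  intro samples mod hdom hpre
  show circular_span samples mod = circular_span_alt samples mod
  cases samples with
  | nil => rw [circular_span, if_pos (Or.inl rfl), circular_span_alt, if_pos (by simp)]
  | cons s0 rest =>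
    cases rest with
    | nil =>
      rw [circular_span, if_pos (show [s0] = [] ∨ [s0].length = 1 from Or.inr rfl),
        circular_span_alt, if_pos (by simp)]
    | cons s1 rest2 =>
      set res := (s0 :: s1 :: rest2).map (fun s => PySem.Int.mod s mod) with hres
      obtain ⟨r0, rt, hresshape⟩ : ∃ r0 rt, res = r0 :: rt := ⟨_, _, rfl⟩
      set lo := (PySem.List.min? res (fun x => x)).getD 0 with hlodef
      set hi := (PySem.List.max? res (fun x => x)).getD 0 with hhidef
      have hlospec : lo ∈ res ∧ ∀ y ∈ res, lo ≤ y := by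
        rw [hlodef, hresshape]; exact min_getD_spec r0 rt 0
      have hhispec : hi ∈ res ∧ ∀ y ∈ res, y ≤ hi := by
        rw [hhidef, hresshape]; exact max_getD_spec r0 rt 0
      have hlenS : (PySem.List.sorted res (fun x => x) false).length = rest2.length + 2 := by
        rw [PySem.List.length_sorted]; simp [hres]
      rcases hL : PySem.List.sorted res (fun x => x) false with _ | ⟨a, _ | ⟨b, T'⟩⟩
      · rw [hL] at hlenS; simp at hlenS
      · rw [hL] at hlenS; simp at hlenS
      · have hA := circA_eq s0 s1 rest2 mod a b T' (by rw [← hres]; exact hL)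
        rw [hA, circB_unfold, ← hres, ← hlodef, ← hhidef]
        -- lo = a
        have hpw : (a :: b :: T').Pairwise (· ≤ ·) := by
          rw [← hL]; exact PySem.List.sorted_pairwise _ _
        have hloa : lo = a := by
          apply le_antisymm
          · exact hlospec.2 a ((PySem.List.mem_sorted _ _ _ _).mp (by rw [hL]; simp))
          · exact PySem.List.key_head_sorted_le res (fun x => x) hL lo hlospec.1
        -- hi = last of sorted
        have hlast := pairwise_le_getLast (b :: T') a hpw
        have hhilast : hi = ((a :: b :: T').getLast?).getD 0 := by
          apply le_antisymm
          · exact hlast.1 hi (by rw [← hL, PySem.List.mem_sorted]; exact hhispec.1)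
          · exact hhispec.2 _ ((PySem.List.mem_sorted _ _ _ _).mp (by rw [hL]; exact hlast.2))
        have hG : largestGap res lo hi = (adjd (a :: b :: T')).foldl max 0 := by
          rw [largestGap_eq (hi - lo).toNat res lo hi rfl hlospec.1 hhispec.1
            (fun x hx => ⟨hlospec.2 x hx, hhispec.2 x hx⟩), hL]
        have hab : a ≤ b := (List.pairwise_cons.mp hpw).1 b (by simp)
        have hG2 : (adjd (a :: b :: T')).foldl max 0 = (adjd (b :: T')).foldl max (b - a) := by
          rw [show adjd (a :: b :: T') = (b - a) :: adjd (b :: T') from rfl, List.foldl_cons]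
          congr 1
          omega
        rw [hG, hG2, hloa, hhilast]
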